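-- pv_equiv track=rewrite | github.com/jenihuang/hb_challenges | MEDIUM/anagrams/anagram.py | find_most_anagrams_from_wordlist
-- ===== SOURCE A (Python) =====
-- from collections import Counter, defaultdict
--
-- def make_anagram_dict(words):
--     """Return dict mapping sorted letters -> [words w/ those letters]
--
--         >>> (make_anagram_dict(["act", "cat", "dog", "god"]) ==
--         ... {'dgo': ['dog', 'god'], 'act': ['act', 'cat']})
--         True
--     """
--     out = defaultdict(list)
--     for word in words:
--         sorted_word = ''.join(sorted(list(word)))
--         out[sorted_word].append(word)
--
--     return out
--
-- def find_most_anagrams_from_wordlist(wordlist):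
--     """Given list of words, return the word with the most anagrams."""
--
--     all_words_dict = make_anagram_dict(wordlist)
--     most_count = 0
--     most_word = None
--
--     for value in all_words_dict.values():
--         if len(value) > most_count:
--             most_count = len(value)
--             most_word = value[0]
--
--     return most_word
-- ===== SOURCE B (Python) =====
-- def find_most_anagrams_from_wordlist(wordlist):
--     """Given list of words, return the word with the most anagrams."""
--     sigs = ["".join(sorted(word)) for word in wordlist]
--     most_count = 0
--     most_word = None
--     for word, sig in zip(wordlist, sigs):
--         count = sigs.count(sig)
--         if count > most_count:
--             most_count = count
--             most_word = word
--     return most_word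
-- ===== Notes on version B (the rewrite author's own statement) =====
-- stated objective: alternative
-- what changed: B drops A's dict-of-anagram-groups entirely: it is a brute-force scan that counts, for each word, how many words in the list share its letter signature by an inner list.count scan, and keeps a running best (word, count); no grouping structure is ever built.
import Mathlib
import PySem

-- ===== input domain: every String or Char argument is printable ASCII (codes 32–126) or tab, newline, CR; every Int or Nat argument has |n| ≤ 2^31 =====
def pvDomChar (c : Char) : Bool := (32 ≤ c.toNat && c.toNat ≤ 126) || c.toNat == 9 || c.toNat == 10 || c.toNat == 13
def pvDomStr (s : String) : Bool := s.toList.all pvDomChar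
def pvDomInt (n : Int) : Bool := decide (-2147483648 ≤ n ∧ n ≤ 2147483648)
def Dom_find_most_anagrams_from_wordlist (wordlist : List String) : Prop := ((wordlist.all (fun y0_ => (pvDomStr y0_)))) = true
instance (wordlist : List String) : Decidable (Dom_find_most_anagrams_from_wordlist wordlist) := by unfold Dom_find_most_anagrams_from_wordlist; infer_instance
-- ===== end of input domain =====

-- B drops A's dict of anagram groups entirely: a brute-force running-best scan that counts each
-- word's anagrams with an inner list.count pass (alternative algorithm, no grouping structure).

-- ===== PORT A =====
-- ''.join(sorted(list(word))): sorting the characters and rebuilding the string (String.mk = ''.join on chars, exact)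
def pvSig (w : String) : String := String.ofList (PySem.List.sorted w.toList (fun c => c) false)

-- make_anagram_dict: defaultdict(list) with out[k].append(w)  =  modify k [] (· ++ [w])
def pvMakeAnagramDict (words : List String) : PySem.Dict String (List String) :=
  words.foldl (fun d w => d.modify (pvSig w) [] (fun v => v ++ [w])) PySem.Dict.empty

-- the loop body: if len(value) > most_count: most_count, most_word = len(value), value[0]
-- (value[0] is ported as pyGetD v 0 "": exact, since the branch only fires when 0 < len v)
def pvStep (st : Int × Option String) (v : List String) : Int × Option String :=
  if st.1 < PySem.List.len v then (PySem.List.len v, some (PySem.List.pyGetD v 0 "")) else st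

def find_most_anagrams_from_wordlist (wordlist : List String) : Option String :=
  ((PySem.Dict.values (pvMakeAnagramDict wordlist)).foldl pvStep ((0 : Int), (none : Option String))).2

-- ===== PORT B =====
-- the loop body over (word, sig) pairs: count = sigs.count(sig); if count > most_count: update
def pvStepB (sigs : List String) (st : Int × Option String) (p : String × String) : Int × Option String :=
  if st.1 < (PySem.List.count sigs p.2 : Int) then ((PySem.List.count sigs p.2 : Int), some p.1) else st

def find_most_anagrams_from_wordlist_alt (wordlist : List String) : Option String :=
  let sigs := wordlist.map pvSig
  ((wordlist.zip sigs).foldl (pvStepB sigs) ((0 : Int), (none : Option String))).2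

-- ===== PRECONDITION & SPEC =====
def Spec_find_most_anagrams_from_wordlist (wordlist : List String) (out : Option String) : Prop := out = find_most_anagrams_from_wordlist_alt wordlist
instance (wordlist : List String) (out : Option String) : Decidable (Spec_find_most_anagrams_from_wordlist wordlist out) := by unfold Spec_find_most_anagrams_from_wordlist; infer_instance

-- ===== CLAIM (what is proved, stated in full; the proofs are below) =====
def Claim_equal_find_most_anagrams_from_wordlist : Prop := ∀ (wordlist : List String), Dom_find_most_anagrams_from_wordlist wordlist → Spec_find_most_anagrams_from_wordlist wordlist (find_most_anagrams_from_wordlist wordlist)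

-- ===== LEMMAS AND PROOFS =====

-- the shared shape of both running-best loop bodies (proof-only abstraction)
def pvGenStep {α : Type} (f : α → Int) (g : α → String) (st : Int × Option String) (x : α) : Int × Option String :=
  if st.1 < f x then (f x, some (g x)) else st

lemma pvStep_eq : pvStep = pvGenStep (fun v => PySem.List.len v) (fun v => PySem.List.pyGetD v 0 "") := rfl

lemma pvStepB_eq (sigs : List String) :
    pvStepB sigs = pvGenStep (fun p => ((PySem.List.count sigs p.2 : Nat) : Int)) (fun p => p.1) := rfl

-- the running maximum a foldl max reaches when nothing exceeds the start
lemma pvFoldMax_le {α : Type} (f : α → Int) :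
    ∀ (t : List α) (c : Int), (∀ x ∈ t, f x ≤ c) → t.foldl (fun a y => max a (f y)) c = c := by
  intro t
  induction t with
  | nil => intro c _; rfl
  | cons x t ih =>
      intro c h
      simp only [List.foldl_cons]
      have hx : f x ≤ c := h x (by simp)
      have : max c (f x) = c := by omega
      rw [this]
      exact ih c (fun y hy => h y (by simp [hy]))

-- a foldl max never exceeds a common upper bound
lemma pvFoldMax_le_bound {α : Type} (f : α → Int) :
    ∀ (t : List α) (c b : Int), c ≤ b → (∀ x ∈ t, f x ≤ b) →
      t.foldl (fun a y => max a (f y)) c ≤ b := by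
  intro t
  induction t with
  | nil => intro c b hc _; simpa using hc
  | cons x t ih =>
      intro c b hc h
      simp only [List.foldl_cons]
      have hx : f x ≤ b := h x (by simp)
      exact ih (max c (f x)) b (by omega) (fun y hy => h y (by simp [hy]))

-- a running-best loop never updates when nothing exceeds the current count
lemma pvGenFold_id {α : Type} (f : α → Int) (g : α → String) :
    ∀ (l : List α) (c : Int) (w : Option String), (∀ x ∈ l, f x ≤ c) →
      l.foldl (pvGenStep f g) (c, w) = (c, w) := by
  intro l
  induction l with
  | nil => intro c w _; rfl
  | cons x t ih =>
      intro c w h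
      simp only [List.foldl_cons, pvGenStep]
      have hx : f x ≤ c := h x (by simp)
      rw [if_neg (by omega)]
      exact ih c w (fun u hu => h u (by simp [hu]))

-- a running-best loop ends at g of the FIRST element attaining the overall maximum
lemma pvGenFold_snd {α : Type} (f : α → Int) (g : α → String) :
    ∀ (l : List α) (c : Int) (w : Option String),
    c < l.foldl (fun a x => max a (f x)) c →
    (l.foldl (pvGenStep f g) (c, w)).2 =
      (l.find? (fun x => f x == l.foldl (fun a y => max a (f y)) c)).map g := by
  intro l
  induction l with
  | nil => intro c w h; simp at h
  | cons x t ih =>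
      intro c w h
      simp only [List.foldl_cons] at h ⊢
      by_cases hc : c < f x
      · have hmax : max c (f x) = f x := by omega
        rw [hmax] at h ⊢
        simp only [pvGenStep, if_pos (show ((c, w) : Int × Option String).1 < f x from hc)]
        by_cases h2 : ∀ u ∈ t, f u ≤ f x
        · -- the head element already attains the maximum
          have hM : t.foldl (fun a y => max a (f y)) (f x) = f x := pvFoldMax_le _ t _ h2
          rw [hM]
          rw [pvGenFold_id f g t _ _ h2]
          rw [List.find?_cons_of_pos (by simp only [beq_iff_eq])]
          rfl
        · -- some later element is strictly larger
          rw [not_forall] at h2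
          simp only [not_forall, not_le, exists_prop] at h2
          obtain ⟨u, hu, hlt⟩ := h2
          have hub := (PySem.List.le_foldl_max_int t f (f x)).2 u hu
          have hM : f x < t.foldl (fun a y => max a (f y)) (f x) := by omega
          rw [List.find?_cons_of_neg (by simp only [Bool.not_eq_true, beq_eq_false_iff_ne]; omega)]
          exact ih _ _ hM
      · have hmax : max c (f x) = c := by omega
        rw [hmax] at h ⊢
        simp only [pvGenStep, if_neg (show ¬ ((c, w) : Int × Option String).1 < f x from hc)]
        have hub := (PySem.List.le_foldl_max_int t f c).1
        rw [List.find?_cons_of_neg (by simp only [Bool.not_eq_true, beq_eq_false_iff_ne]; omega)]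
        exact ih _ _ h

-- the anagram dict's entry for s is the subsequence of words with signature s
lemma pvDict_getD (ws : List String) (s : String) :
    (pvMakeAnagramDict ws).getD s [] = ws.filter (fun w => pvSig w == s) := by
  unfold pvMakeAnagramDict
  rw [show ws.foldl (fun d w => d.modify (pvSig w) [] (fun v => v ++ [w])) PySem.Dict.empty
      = (ws.map (fun w => (pvSig w, w))).foldl (fun d p => d.modify p.1 [] (fun v => v ++ [p.2])) PySem.Dict.empty
      from by rw [List.foldl_map]]
  rw [PySem.Dict.getD_foldl_modify_append]
  simp [List.filter_map, Function.comp_def]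

lemma pvDict_keys (ws : List String) :
    (pvMakeAnagramDict ws).keys = PySem.Set.ofList (ws.map pvSig) := by
  unfold pvMakeAnagramDict
  rw [PySem.Dict.keys_foldl_modify_key]
  simp [PySem.Set.ofList_eq_foldl, PySem.Set.update, PySem.Dict.keys_empty]

lemma pvDict_nodup (ws : List String) : (pvMakeAnagramDict ws).keys.Nodup := by
  unfold pvMakeAnagramDict
  exact PySem.Dict.nodup_keys_foldl_modify_key _ _ _ _ _ PySem.Dict.nodup_keys_empty

-- a dict with nodup keys: values are the getD images of the keys
lemma pvValues_eq {ν : Type} (d : PySem.Dict String ν) (d0 : ν) (h : d.keys.Nodup) :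
    d.values = d.keys.map (fun k => d.getD k d0) := by
  simp only [PySem.Dict.values, PySem.Dict.keys, List.map_map]
  apply List.map_congr_left
  intro p hp
  cases p with
  | mk k v => exact (PySem.Dict.getD_of_mem_items d hp h d0).symm

-- Set.update only ever appends
lemma pvUpdate_append : ∀ (l : List String) (s : PySem.Set String),
    ∃ t, PySem.Set.update s l = s ++ t := by
  intro l
  induction l with
  | nil => intro s; exact ⟨[], by simp [PySem.Set.update]⟩
  | cons x l ih =>
      intro s
      have hstep : PySem.Set.update s (x :: l) = PySem.Set.update (PySem.Set.add s x) l := rfl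
      rw [hstep]
      obtain ⟨t, ht⟩ := ih (PySem.Set.add s x)
      rw [PySem.Set.add_eq_ite] at ht
      by_cases hm : x ∈ s
      · exact ⟨t, by simpa [hm] using ht⟩
      · exact ⟨x :: t, by simpa [hm] using ht⟩

-- the tie-break bridge: scanning the words for a signature property = scanning the
-- first-occurrence-ordered signatures and taking the first word of the found group
lemma pvBridge {α : Type} (f : α → String) (Q : String → Bool) :
    ∀ (ws : List α) (s : PySem.Set String), (∀ k ∈ s, Q k = false) →
    ws.find? (fun w => Q (f w)) =
      ((PySem.Set.update s (ws.map f)).find? Q).bind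
        (fun k => (ws.filter (fun w => f w == k)).head?) := by
  intro ws
  induction ws with
  | nil =>
      intro s hs
      simp only [List.map_nil, List.find?_nil]
      have hupd : PySem.Set.update s [] = s := rfl
      rw [hupd]
      rw [List.find?_eq_none.2 (by intro x hx; simp [hs x hx])]
      rfl
  | cons w t ih =>
      intro s hs
      simp only [List.map_cons]
      have hstep : PySem.Set.update s (f w :: t.map f) = PySem.Set.update (PySem.Set.add s (f w)) (t.map f) := rfl
      rw [hstep]
      by_cases hq : Q (f w) = true
      · -- the head word's signature is the first key satisfying Q
        have hfw : f w ∉ s := fun hm => by simp [hs _ hm] at hq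
        rw [PySem.Set.add_eq_ite, if_neg hfw]
        obtain ⟨u, hu⟩ := pvUpdate_append (t.map f) (s ++ [f w])
        rw [hu, List.append_assoc, List.find?_append]
        have hnone : List.find? Q s = none := List.find?_eq_none.2 (fun x hx => by simp [hs x hx])
        rw [hnone, Option.none_or]
        simp only [List.cons_append]
        rw [List.find?_cons_of_pos hq]
        rw [List.find?_cons_of_pos (by simpa using hq)]
        simp only [Option.bind_some, List.filter_cons, beq_self_eq_true]
        simp
      · rw [List.find?_cons_of_neg (by simpa using hq)]
        have hs' : ∀ k ∈ PySem.Set.add s (f w), Q k = false := by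
          intro k hk
          rcases (PySem.Set.mem_add _ _ _).1 hk with h | h
          · exact hs k h
          · simpa [h] using hq
        rw [ih (PySem.Set.add s (f w)) hs']
        -- the found key cannot be f w, so filtering w :: t equals filtering t
        cases hfind : ((PySem.Set.update (PySem.Set.add s (f w)) (t.map f)).find? Q) with
        | none => rfl
        | some k =>
            have hk : Q k = true := List.find?_some hfind
            have hne : (f w == k) = false := by
              by_cases h : f w = k
              · subst h; simp [hq] at hk
              · simp [h]
            simp only [Option.bind_some, List.filter_cons, hne]
            simp

-- count of a signature among the words = size of its anagram group
lemma pvLen_filter (L : List String) (k : String) :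
    PySem.List.len (L.filter (fun w => pvSig w == k)) = ((L.map pvSig).count k : Int) := by
  rw [PySem.List.len_eq, ← List.countP_eq_length_filter]
  simp [List.count_eq_countP, List.countP_map, Function.comp_def]

-- zipping a list with its mapped signatures is mapping to pairs
lemma pvZip_map {α β : Type} (f : α → β) : ∀ (l : List α),
    l.zip (l.map f) = l.map (fun x => (x, f x)) := by
  intro l
  induction l with
  | nil => rfl
  | cons x t ih => simp [ih]

-- A's maximum (over the distinct signatures) equals B's maximum (over all words)
lemma pvMax_eq (w0 : String) (rest : List String) :
    (PySem.Set.ofList ((w0 :: rest).map pvSig)).foldl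
        (fun a k => max a ((((w0 :: rest).map pvSig).count k : Int))) 0
      = (w0 :: rest).foldl
          (fun a w => max a ((((w0 :: rest).map pvSig).count (pvSig w) : Int))) 0 := by
  have h1 := PySem.List.le_foldl_max_int (PySem.Set.ofList ((w0 :: rest).map pvSig))
    (fun k => ((((w0 :: rest).map pvSig).count k : Int))) 0
  have h2 := PySem.List.le_foldl_max_int (w0 :: rest)
    (fun w => ((((w0 :: rest).map pvSig).count (pvSig w) : Int))) 0
  apply le_antisymm
  · apply pvFoldMax_le_bound
    · exact h2.1
    · intro k hk
      have hkL : k ∈ (w0 :: rest).map pvSig := (PySem.Set.mem_ofList _ _).1 hk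
      obtain ⟨w, hw, hwk⟩ := List.mem_map.1 hkL
      have := h2.2 w hw
      rw [hwk] at this
      exact this
  · apply pvFoldMax_le_bound
    · exact h1.1
    · intro w hw
      have hmem : pvSig w ∈ PySem.Set.ofList ((w0 :: rest).map pvSig) :=
        (PySem.Set.mem_ofList _ _).2 (List.mem_map.2 ⟨w, hw, rfl⟩)
      exact h1.2 _ hmem

-- A as a first-word scan: A returns the first word whose signature's count is maximal
lemma pvA_find (w0 : String) (rest : List String) :
    find_most_anagrams_from_wordlist (w0 :: rest)
      = (w0 :: rest).find? (fun w =>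
          ((((w0 :: rest).map pvSig).count (pvSig w) : Int)) ==
            (PySem.Set.ofList ((w0 :: rest).map pvSig)).foldl
              (fun a k => max a ((((w0 :: rest).map pvSig).count k : Int))) 0) := by
  have hcnt1 : (1 : Int) ≤ (((w0 :: rest).map pvSig).count (pvSig w0) : Int) := by
    have : 0 < ((w0 :: rest).map pvSig).count (pvSig w0) :=
      List.count_pos_iff.2 (by simp)
    exact_mod_cast this
  -- the group-fold maximum rewritten to a count-fold over the keys
  have hMfold : ((PySem.Set.ofList ((w0 :: rest).map pvSig)).map
        (fun k => (w0 :: rest).filter (fun w => pvSig w == k))).foldl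
        (fun a v => max a (PySem.List.len v)) 0
      = (PySem.Set.ofList ((w0 :: rest).map pvSig)).foldl
          (fun a k => max a ((((w0 :: rest).map pvSig).count k : Int))) 0 := by
    rw [List.foldl_map]
    apply PySem.List.foldl_congr_mem
    intro acc k _
    rw [pvLen_filter]
  have hMpos : (0 : Int) < (PySem.Set.ofList ((w0 :: rest).map pvSig)).foldl
      (fun a k => max a ((((w0 :: rest).map pvSig).count k : Int))) 0 := by
    have hmem : pvSig w0 ∈ PySem.Set.ofList ((w0 :: rest).map pvSig) :=
      (PySem.Set.mem_ofList _ _).2 (by simp)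
    have := (PySem.List.le_foldl_max_int (PySem.Set.ofList ((w0 :: rest).map pvSig))
      (fun k => ((((w0 :: rest).map pvSig).count k : Int))) 0).2 _ hmem
    omega
  -- A = find? over the groups, by the running-best lemma
  have hA : find_most_anagrams_from_wordlist (w0 :: rest)
      = (((PySem.Set.ofList ((w0 :: rest).map pvSig)).map
            (fun k => (w0 :: rest).filter (fun w => pvSig w == k))).find?
          (fun v => PySem.List.len v ==
            ((PySem.Set.ofList ((w0 :: rest).map pvSig)).map
              (fun k => (w0 :: rest).filter (fun w => pvSig w == k))).foldl
              (fun a v => max a (PySem.List.len v)) 0)).map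
          (fun v => PySem.List.pyGetD v 0 "") := by
    unfold find_most_anagrams_from_wordlist
    rw [pvValues_eq _ ([] : List String) (pvDict_nodup _), pvDict_keys]
    simp only [pvDict_getD, pvStep_eq]
    exact pvGenFold_snd _ _ _ 0 none (by rw [hMfold]; exact hMpos)
  rw [hA]
  -- the word-scan side via the tie-break bridge
  rw [pvBridge pvSig
      (fun k => ((((w0 :: rest).map pvSig).count k : Int)) ==
        (PySem.Set.ofList ((w0 :: rest).map pvSig)).foldl
          (fun a k => max a ((((w0 :: rest).map pvSig).count k : Int))) 0)
      (w0 :: rest) [] (by intro k hk; simp at hk)]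
  have hupd : PySem.Set.update ([] : PySem.Set String) ((w0 :: rest).map pvSig)
      = PySem.Set.ofList ((w0 :: rest).map pvSig) := by
    rw [PySem.Set.ofList_eq_foldl]; rfl
  rw [hupd]
  rw [List.find?_map]
  -- the two find?s use extensionally equal predicates
  have hpred : ((fun v => PySem.List.len v ==
          ((PySem.Set.ofList ((w0 :: rest).map pvSig)).map
            (fun k => (w0 :: rest).filter (fun w => pvSig w == k))).foldl
            (fun a v => max a (PySem.List.len v)) 0) ∘
        (fun k => (w0 :: rest).filter (fun w => pvSig w == k)))
      = (fun k => ((((w0 :: rest).map pvSig).count k : Int)) ==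
          (PySem.Set.ofList ((w0 :: rest).map pvSig)).foldl
            (fun a k => max a ((((w0 :: rest).map pvSig).count k : Int))) 0) := by
    funext k
    simp only [Function.comp_def, pvLen_filter, hMfold]
  rw [hpred]
  -- the found group is nonempty, so map pyGetD = bind head?
  cases hfind : ((PySem.Set.ofList ((w0 :: rest).map pvSig)).find?
      (fun k => ((((w0 :: rest).map pvSig).count k : Int)) ==
        (PySem.Set.ofList ((w0 :: rest).map pvSig)).foldl
          (fun a k => max a ((((w0 :: rest).map pvSig).count k : Int))) 0)) with
  | none => rfl
  | some k =>
      have hk := List.find?_some hfind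
      have hkM : ((((w0 :: rest).map pvSig).count k : Int))
          = (PySem.Set.ofList ((w0 :: rest).map pvSig)).foldl
              (fun a k => max a ((((w0 :: rest).map pvSig).count k : Int))) 0 := by
        exact_mod_cast beq_iff_eq.1 hk
      have hne : (w0 :: rest).filter (fun w => pvSig w == k) ≠ [] := by
        intro hnil
        have := pvLen_filter (w0 :: rest) k
        rw [hnil] at this
        simp only [PySem.List.len_eq, List.length_nil] at this
        omega
      simp only [Option.map_some, Option.bind_some]
      cases hg : (w0 :: rest).filter (fun w => pvSig w == k) with
      | nil => exact absurd hg hne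
      | cons a l => rw [PySem.List.pyGetD_zero_cons]; rfl

-- B as the same first-word scan (with the maximum taken over all words)
lemma pvB_find (w0 : String) (rest : List String) :
    find_most_anagrams_from_wordlist_alt (w0 :: rest)
      = (w0 :: rest).find? (fun w =>
          ((((w0 :: rest).map pvSig).count (pvSig w) : Int)) ==
            (w0 :: rest).foldl
              (fun a w => max a ((((w0 :: rest).map pvSig).count (pvSig w) : Int))) 0) := by
  have h0 : find_most_anagrams_from_wordlist_alt (w0 :: rest)
      = (((w0 :: rest).map (fun x => (x, pvSig x))).foldl
          (pvGenStep (fun p => ((PySem.List.count ((w0 :: rest).map pvSig) p.2 : Nat) : Int))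
            (fun p => p.1))
          ((0 : Int), (none : Option String))).2 := by
    unfold find_most_anagrams_from_wordlist_alt
    simp only [pvZip_map, pvStepB_eq]
  have hcnt1 : (1 : Int) ≤ ((PySem.List.count ((w0 :: rest).map pvSig) (pvSig w0) : Nat) : Int) := by
    rw [PySem.List.count_eq]
    have : 0 < List.count (pvSig w0) ((w0 :: rest).map pvSig) :=
      List.count_pos_iff.2 (by simp)
    exact_mod_cast this
  have hMpos : (0 : Int) < ((w0 :: rest).map (fun x => (x, pvSig x))).foldl
      (fun a p => max a ((PySem.List.count ((w0 :: rest).map pvSig) p.2 : Nat) : Int)) 0 := by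
    have hmem : ((w0, pvSig w0) : String × String) ∈ ((w0 :: rest).map (fun x => (x, pvSig x))) := by simp
    have := (PySem.List.le_foldl_max_int ((w0 :: rest).map (fun x => (x, pvSig x)))
      (fun p => ((PySem.List.count ((w0 :: rest).map pvSig) p.2 : Nat) : Int)) 0).2 _ hmem
    simp only at this
    omega
  rw [h0, pvGenFold_snd _ _ _ 0 none hMpos]
  rw [List.find?_map, Option.map_map, List.foldl_map]
  simp only [Function.comp_def, PySem.List.count_eq]
  simp

-- ===== VERDICT (by name: the statement is the Claim_ definition above) =====
theorem find_most_anagrams_from_wordlist_spec : Claim_equal_find_most_anagrams_from_wordlist := by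
  intro ws _
  unfold Spec_find_most_anagrams_from_wordlist
  cases ws with
  | nil => rfl
  | cons w0 rest =>
      rw [pvA_find, pvB_find, pvMax_eq]
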